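-- pv_equiv track=rewrite | github.com/namastexlabs/automagik-hive | src/hooks/domain/value_objects.py | get_suggested_genie_path
-- ===== SOURCE A (Python) =====
-- def get_suggested_genie_path(filename: str) -> str:
--     """Suggest appropriate /genie/ path based on filename patterns.
--
--     Args:
--         filename: Name of file to suggest path for.
--
--     Returns:
--         Suggested full path within genie structure.
--     """
--     filename_lower = filename.lower()
--
--     # Pattern-based suggestions (order matters - more specific patterns first)
--     if any(word in filename_lower for word in ["plan", "wish", "todo"]):
--         return f"/genie/wishes/{filename}"
--     if any(
--         word in filename_lower for word in ["design", "architecture", "ddd", "spec"]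
--     ):
--         return f"/genie/docs/{filename}"
--     if any(
--         word in filename_lower for word in ["idea", "analysis", "brain", "think"]
--     ):
--         return f"/genie/ideas/{filename}"
--     if any(word in filename_lower for word in ["experiment", "prototype", "trial"]):
--         return f"/genie/experiments/{filename}"
--     if any(
--         word in filename_lower
--         for word in ["report", "complete", "summary", "result"]
--     ):
--         return f"/genie/ideas/{filename}"
--     if any(
--         word in filename_lower
--         for word in ["learn", "knowledge", "pattern", "wisdom"]
--     ):
--         return f"/genie/knowledge/{filename}"
--     if any(word in filename_lower for word in ["test"]):
--         return f"/genie/experiments/{filename}"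
--     # Default to docs for unclassified files
--     return f"/genie/docs/{filename}"
-- ===== SOURCE B (Python) =====
-- _KEYWORD_GROUP = {
--     "plan": 0, "wish": 0, "todo": 0,
--     "design": 1, "architecture": 1, "ddd": 1, "spec": 1,
--     "idea": 2, "analysis": 2, "brain": 2, "think": 2,
--     "experiment": 3, "prototype": 3, "trial": 3,
--     "report": 4, "complete": 4, "summary": 4, "result": 4,
--     "learn": 5, "knowledge": 5, "pattern": 5, "wisdom": 5,
--     "test": 6,
-- }
--
-- _DESTS = ["wishes", "docs", "ideas", "experiments", "ideas", "knowledge", "experiments", "docs"]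
--
--
-- def get_suggested_genie_path(filename: str) -> str:
--     low = filename.lower()
--     best = min((g for w, g in _KEYWORD_GROUP.items() if w in low), default=len(_DESTS) - 1)
--     return f"/genie/{_DESTS[best]}/{filename}"
-- ===== Notes on version B (the rewrite author's own statement) =====
-- stated objective: alternative
-- what changed: Replaces the short-circuit chain of seven group checks with a min-aggregation: scan a flat keyword-to-group-index map, take the minimum matched group index (default = last), and index into a destination array; correct because the chain returns the lowest-indexed matching group.
import Mathlib
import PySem

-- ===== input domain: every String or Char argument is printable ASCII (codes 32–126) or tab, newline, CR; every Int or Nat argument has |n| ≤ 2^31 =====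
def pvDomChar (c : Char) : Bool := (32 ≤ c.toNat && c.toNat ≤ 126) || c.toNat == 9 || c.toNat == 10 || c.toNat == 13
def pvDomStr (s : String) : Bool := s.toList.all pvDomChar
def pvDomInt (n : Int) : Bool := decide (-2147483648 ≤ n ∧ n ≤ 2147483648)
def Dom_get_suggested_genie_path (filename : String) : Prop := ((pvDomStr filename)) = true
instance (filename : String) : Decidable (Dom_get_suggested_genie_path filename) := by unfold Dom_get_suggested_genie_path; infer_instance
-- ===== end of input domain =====

-- B replaces A's short-circuit chain of group checks by a min-aggregation over a flat keyword→group map plus a destination array (alternative decomposition, same cost).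


-- ===== PORT A =====
def get_suggested_genie_path (filename : String) : String :=
  let filename_lower := PySem.Str.lower filename
  if ["plan", "wish", "todo"].any (fun word => PySem.Str.isIn word filename_lower) then
    "/genie/wishes/" ++ filename
  else if ["design", "architecture", "ddd", "spec"].any (fun word => PySem.Str.isIn word filename_lower) then
    "/genie/docs/" ++ filename
  else if ["idea", "analysis", "brain", "think"].any (fun word => PySem.Str.isIn word filename_lower) then
    "/genie/ideas/" ++ filename
  else if ["experiment", "prototype", "trial"].any (fun word => PySem.Str.isIn word filename_lower) then
    "/genie/experiments/" ++ filename
  else if ["report", "complete", "summary", "result"].any (fun word => PySem.Str.isIn word filename_lower) then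
    "/genie/ideas/" ++ filename
  else if ["learn", "knowledge", "pattern", "wisdom"].any (fun word => PySem.Str.isIn word filename_lower) then
    "/genie/knowledge/" ++ filename
  else if ["test"].any (fun word => PySem.Str.isIn word filename_lower) then
    "/genie/experiments/" ++ filename
  else
    "/genie/docs/" ++ filename

-- ===== PORT B =====
-- flat keyword → group-index map (Source B's _KEYWORD_GROUP, insertion order)
def genieKeywordGroup : List (String × Nat) :=
  [ ("plan", 0), ("wish", 0), ("todo", 0),
    ("design", 1), ("architecture", 1), ("ddd", 1), ("spec", 1),
    ("idea", 2), ("analysis", 2), ("brain", 2), ("think", 2),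
    ("experiment", 3), ("prototype", 3), ("trial", 3),
    ("report", 4), ("complete", 4), ("summary", 4), ("result", 4),
    ("learn", 5), ("knowledge", 5), ("pattern", 5), ("wisdom", 5),
    ("test", 6) ]

-- destination array (Source B's _DESTS)
def genieDests : List String :=
  ["wishes", "docs", "ideas", "experiments", "ideas", "knowledge", "experiments", "docs"]

def get_suggested_genie_path_alt (filename : String) : String :=
  let low := PySem.Str.lower filename
  -- min(... , default = len(_DESTS) - 1): filter the matched keywords, fold min over their group indices
  let best := ((genieKeywordGroup.filter (fun wg => PySem.Str.isIn wg.1 low)).map (fun wg => wg.2)).foldl Nat.min (genieDests.length - 1)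
  "/genie/" ++ genieDests.getD best "" ++ "/" ++ filename

-- ===== PRECONDITION & SPEC =====
def Spec_get_suggested_genie_path (filename : String) (out : String) : Prop := out = get_suggested_genie_path_alt filename
instance (filename : String) (out : String) : Decidable (Spec_get_suggested_genie_path filename out) := by unfold Spec_get_suggested_genie_path; infer_instance

-- ===== CLAIM (what is proved, stated in full; the proofs are below) =====
def Claim_equal_get_suggested_genie_path : Prop := ∀ (filename : String), Dom_get_suggested_genie_path filename → Spec_get_suggested_genie_path filename (get_suggested_genie_path filename)

-- ===== LEMMAS AND PROOFS =====

-- a segment of keywords sharing one group index contributes `Nat.min acc p` iff any keyword matches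
theorem genie_seg_fold (ws : List String) (p : Nat) (low : String) (acc : Nat) :
    (((ws.map (fun w => (w, p))).filter (fun wg => PySem.Str.isIn wg.1 low)).map (fun wg => wg.2)).foldl Nat.min acc
      = if ws.any (fun w => PySem.Str.isIn w low) then Nat.min acc p else acc := by
  induction ws generalizing acc with
  | nil => simp
  | cons w ws ih =>
      simp only [List.map_cons, List.filter_cons, List.any_cons]
      by_cases h : PySem.Str.isIn w low = true
      · simp only [h, if_true, Bool.true_or, List.map_cons, List.foldl_cons, ih]
        split_ifs <;> simp
      · simp only [Bool.not_eq_true] at h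
        simp only [h, Bool.false_eq_true, if_false, Bool.false_or, ih]

-- the boolean core: A's if-chain equals B's min-index lookup, for all 7 group flags
theorem genie_chain (g1 g2 g3 g4 g5 g6 g7 : Bool) (f : String) :
    (if g1 then "/genie/wishes/" ++ f
     else if g2 then "/genie/docs/" ++ f
     else if g3 then "/genie/ideas/" ++ f
     else if g4 then "/genie/experiments/" ++ f
     else if g5 then "/genie/ideas/" ++ f
     else if g6 then "/genie/knowledge/" ++ f
     else if g7 then "/genie/experiments/" ++ f
     else "/genie/docs/" ++ f)
    = "/genie/" ++ genieDests.getD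
        (if g7 then Nat.min (if g6 then Nat.min (if g5 then Nat.min (if g4 then Nat.min
          (if g3 then Nat.min (if g2 then Nat.min (if g1 then Nat.min 7 0 else 7) 1
            else if g1 then Nat.min 7 0 else 7) 2
            else if g2 then Nat.min (if g1 then Nat.min 7 0 else 7) 1 else if g1 then Nat.min 7 0 else 7) 3
            else if g3 then Nat.min (if g2 then Nat.min (if g1 then Nat.min 7 0 else 7) 1
              else if g1 then Nat.min 7 0 else 7) 2
              else if g2 then Nat.min (if g1 then Nat.min 7 0 else 7) 1 else if g1 then Nat.min 7 0 else 7) 4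
            else if g4 then Nat.min (if g3 then Nat.min (if g2 then Nat.min (if g1 then Nat.min 7 0 else 7) 1
              else if g1 then Nat.min 7 0 else 7) 2
              else if g2 then Nat.min (if g1 then Nat.min 7 0 else 7) 1 else if g1 then Nat.min 7 0 else 7) 3
              else if g3 then Nat.min (if g2 then Nat.min (if g1 then Nat.min 7 0 else 7) 1
                else if g1 then Nat.min 7 0 else 7) 2
                else if g2 then Nat.min (if g1 then Nat.min 7 0 else 7) 1 else if g1 then Nat.min 7 0 else 7) 5
          else if g5 then Nat.min (if g4 then Nat.min (if g3 then Nat.min (if g2 then Nat.min (if g1 then Nat.min 7 0 else 7) 1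
            else if g1 then Nat.min 7 0 else 7) 2
            else if g2 then Nat.min (if g1 then Nat.min 7 0 else 7) 1 else if g1 then Nat.min 7 0 else 7) 3
            else if g3 then Nat.min (if g2 then Nat.min (if g1 then Nat.min 7 0 else 7) 1
              else if g1 then Nat.min 7 0 else 7) 2
              else if g2 then Nat.min (if g1 then Nat.min 7 0 else 7) 1 else if g1 then Nat.min 7 0 else 7) 4
            else if g4 then Nat.min (if g3 then Nat.min (if g2 then Nat.min (if g1 then Nat.min 7 0 else 7) 1
              else if g1 then Nat.min 7 0 else 7) 2
              else if g2 then Nat.min (if g1 then Nat.min 7 0 else 7) 1 else if g1 then Nat.min 7 0 else 7) 3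
              else if g3 then Nat.min (if g2 then Nat.min (if g1 then Nat.min 7 0 else 7) 1
                else if g1 then Nat.min 7 0 else 7) 2
                else if g2 then Nat.min (if g1 then Nat.min 7 0 else 7) 1 else if g1 then Nat.min 7 0 else 7) 6
         else if g6 then Nat.min (if g5 then Nat.min (if g4 then Nat.min (if g3 then Nat.min (if g2 then Nat.min (if g1 then Nat.min 7 0 else 7) 1
            else if g1 then Nat.min 7 0 else 7) 2
            else if g2 then Nat.min (if g1 then Nat.min 7 0 else 7) 1 else if g1 then Nat.min 7 0 else 7) 3
            else if g3 then Nat.min (if g2 then Nat.min (if g1 then Nat.min 7 0 else 7) 1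
              else if g1 then Nat.min 7 0 else 7) 2
              else if g2 then Nat.min (if g1 then Nat.min 7 0 else 7) 1 else if g1 then Nat.min 7 0 else 7) 4
            else if g4 then Nat.min (if g3 then Nat.min (if g2 then Nat.min (if g1 then Nat.min 7 0 else 7) 1
              else if g1 then Nat.min 7 0 else 7) 2
              else if g2 then Nat.min (if g1 then Nat.min 7 0 else 7) 1 else if g1 then Nat.min 7 0 else 7) 3
              else if g3 then Nat.min (if g2 then Nat.min (if g1 then Nat.min 7 0 else 7) 1
                else if g1 then Nat.min 7 0 else 7) 2
                else if g2 then Nat.min (if g1 then Nat.min 7 0 else 7) 1 else if g1 then Nat.min 7 0 else 7) 5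
          else if g5 then Nat.min (if g4 then Nat.min (if g3 then Nat.min (if g2 then Nat.min (if g1 then Nat.min 7 0 else 7) 1
            else if g1 then Nat.min 7 0 else 7) 2
            else if g2 then Nat.min (if g1 then Nat.min 7 0 else 7) 1 else if g1 then Nat.min 7 0 else 7) 3
            else if g3 then Nat.min (if g2 then Nat.min (if g1 then Nat.min 7 0 else 7) 1
              else if g1 then Nat.min 7 0 else 7) 2
              else if g2 then Nat.min (if g1 then Nat.min 7 0 else 7) 1 else if g1 then Nat.min 7 0 else 7) 4
            else if g4 then Nat.min (if g3 then Nat.min (if g2 then Nat.min (if g1 then Nat.min 7 0 else 7) 1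
              else if g1 then Nat.min 7 0 else 7) 2
              else if g2 then Nat.min (if g1 then Nat.min 7 0 else 7) 1 else if g1 then Nat.min 7 0 else 7) 3
              else if g3 then Nat.min (if g2 then Nat.min (if g1 then Nat.min 7 0 else 7) 1
                else if g1 then Nat.min 7 0 else 7) 2
                else if g2 then Nat.min (if g1 then Nat.min 7 0 else 7) 1 else if g1 then Nat.min 7 0 else 7) "" ++ "/" ++ f := by
  cases g1 <;> cases g2 <;> cases g3 <;> cases g4 <;> cases g5 <;> cases g6 <;> cases g7 <;> rfl

-- ===== VERDICT (by name: the statement is the Claim_ definition above) =====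
theorem get_suggested_genie_path_spec : Claim_equal_get_suggested_genie_path := by
  intro filename _
  unfold Spec_get_suggested_genie_path get_suggested_genie_path get_suggested_genie_path_alt
  set low := PySem.Str.lower filename with hlow
  have htab : genieKeywordGroup =
      (["plan", "wish", "todo"].map (fun w => (w, (0:Nat))))
      ++ (["design", "architecture", "ddd", "spec"].map (fun w => (w, (1:Nat))))
      ++ (["idea", "analysis", "brain", "think"].map (fun w => (w, (2:Nat))))
      ++ (["experiment", "prototype", "trial"].map (fun w => (w, (3:Nat))))
      ++ (["report", "complete", "summary", "result"].map (fun w => (w, (4:Nat))))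
      ++ (["learn", "knowledge", "pattern", "wisdom"].map (fun w => (w, (5:Nat))))
      ++ (["test"].map (fun w => (w, (6:Nat)))) := by rfl
  have hlen : genieDests.length - 1 = 7 := by rfl
  rw [htab, hlen]
  simp only [List.filter_append, List.map_append, List.foldl_append, genie_seg_fold]
  exact genie_chain _ _ _ _ _ _ _ filename
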